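-- pv_equiv track=rewrite | github.com/Erasimos/aoc | 2024/day_7.py | get_possible_solutions_2
-- ===== SOURCE A (Python) =====
-- def get_possible_solutions_2(equation: dict):
--
--     args = equation.get('args', [])
--     possible_solutions = [args[0]]
--     for arg in args[1:]:
--         new_possible_solutions = []
--         for sol in possible_solutions:
--             new_possible_solutions.append(sol * arg)
--             new_possible_solutions.append(sol + arg)
--             new_possible_solutions.append(int(str(sol) + str(arg)))
--         possible_solutions = new_possible_solutions
--     return possible_solutions
-- ===== SOURCE B (Python) =====
-- from itertools import product
--
--
-- def _op_mul(a, b):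
--     return a * b
--
--
-- def _op_add(a, b):
--     return a + b
--
--
-- def _op_concat(a, b):
--     return int(str(a) + str(b))
--
--
-- def get_possible_solutions_2(equation: dict):
--     args = equation.get('args', [])
--     seed = args[0]
--     rest = args[1:]
--     results = []
--     for combo in product([_op_mul, _op_add, _op_concat], repeat=len(rest)):
--         val = seed
--         for op, arg in zip(combo, rest):
--             val = op(val, arg)
--         results.append(val)
--     return results
-- ===== Notes on version B (the rewrite author's own statement) =====
-- stated objective: alternative
-- what changed: B replaces A's level-by-level breadth-first rebuilding of the whole candidate list with an enumeration of operator tuples via itertools.product, left-folding each tuple over the args; same output order because product varies the last operator fastest.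
import Mathlib
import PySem

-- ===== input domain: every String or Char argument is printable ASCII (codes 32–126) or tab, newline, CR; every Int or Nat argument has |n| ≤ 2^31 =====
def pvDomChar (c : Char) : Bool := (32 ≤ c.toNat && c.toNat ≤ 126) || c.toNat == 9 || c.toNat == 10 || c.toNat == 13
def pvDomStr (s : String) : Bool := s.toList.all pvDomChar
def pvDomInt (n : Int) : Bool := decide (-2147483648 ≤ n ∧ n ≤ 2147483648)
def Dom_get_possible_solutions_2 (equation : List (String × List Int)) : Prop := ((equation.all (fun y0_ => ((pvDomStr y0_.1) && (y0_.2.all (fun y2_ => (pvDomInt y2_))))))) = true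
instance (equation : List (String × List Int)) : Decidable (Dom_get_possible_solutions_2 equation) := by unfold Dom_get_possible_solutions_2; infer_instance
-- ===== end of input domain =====

-- B enumerates operator tuples (itertools.product style) and folds each over the args,
-- instead of A's level-by-level rebuilding of the whole candidate list; alternative decomposition, same cost.

-- ===== PORT A =====
def get_possible_solutions_2 (equation : List (String × List Int)) : List Int :=
  let args := (PySem.Dict.mk equation).getD "args" []
  -- args[0]: IndexError on empty args — excluded by Pre_; the total form defaults to 0 there
  let possible0 : List Int := [(PySem.List.pyGet? args 0).getD 0]
  -- int(str(sol) + str(arg)): ofChars? is none exactly where Python raises ValueError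
  -- (some later arg negative) — excluded by Pre_; total form defaults to 0 there
  (PySem.List.slice args (some 1) none).foldl
    (fun possible arg =>
      possible.foldl
        (fun acc sol =>
          acc ++ [sol * arg, sol + arg,
            (PySem.Int.ofChars? (PySem.Int.toChars sol ++ PySem.Int.toChars arg)).getD 0])
        [])
    possible0

-- ===== PORT B =====
def pvOpMul (a b : Int) : Int := a * b
def pvOpAdd (a b : Int) : Int := a + b
-- int(str(a) + str(b)), same total form as in port A (none = ValueError, excluded by Pre_)
def pvOpConcat (a b : Int) : Int :=
  (PySem.Int.ofChars? (PySem.Int.toChars a ++ PySem.Int.toChars b)).getD 0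

def pvOps : List (Int → Int → Int) := [pvOpMul, pvOpAdd, pvOpConcat]

-- itertools.product(ops, repeat = n): leftmost position varies slowest
def pvProduct : Nat → List (List (Int → Int → Int))
  | 0 => [[]]
  | n + 1 => pvOps.flatMap (fun o => (pvProduct n).map (o :: ·))

def get_possible_solutions_2_alt (equation : List (String × List Int)) : List Int :=
  let args := (PySem.Dict.mk equation).getD "args" []
  let seed := (PySem.List.pyGet? args 0).getD 0
  let rest := PySem.List.slice args (some 1) none
  (pvProduct rest.length).map (fun combo =>
    (combo.zip rest).foldl (fun val p => p.1 val p.2) seed)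

-- ===== PRECONDITION & SPEC =====
-- A raises IndexError when the 'args' list is empty and ValueError (int of a string with an
-- interior '-') when any argument after the first is negative; Pre_ excludes exactly those inputs.
def Pre_get_possible_solutions_2 (equation : List (String × List Int)) : Prop :=
  let args := (PySem.Dict.mk equation).getD "args" []
  args ≠ [] ∧ ∀ a ∈ args.tail, 0 ≤ a
instance (equation : List (String × List Int)) : Decidable (Pre_get_possible_solutions_2 equation) := by unfold Pre_get_possible_solutions_2; infer_instance

def pvWitness_get_possible_solutions_2 : (List (String × List Int)) := [("args", [2, 3])]

def Spec_get_possible_solutions_2 (equation : List (String × List Int)) (out : List Int) : Prop := out = get_possible_solutions_2_alt equation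
instance (equation : List (String × List Int)) (out : List Int) : Decidable (Spec_get_possible_solutions_2 equation out) := by unfold Spec_get_possible_solutions_2; infer_instance

-- ===== CLAIM (what is proved, stated in full; the proofs are below) =====
def Claim_equal_get_possible_solutions_2 : Prop := ∀ (equation : List (String × List Int)), Dom_get_possible_solutions_2 equation → Pre_get_possible_solutions_2 equation → Spec_get_possible_solutions_2 equation (get_possible_solutions_2 equation)

-- ===== LEMMAS AND PROOFS =====

-- A's level-by-level expansion from any seed list equals the product-of-operators enumeration.
lemma pv_levels_eq_product (rest : List Int) (sols : List Int) :
    rest.foldl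
      (fun possible arg =>
        possible.foldl
          (fun acc sol =>
            acc ++ [sol * arg, sol + arg,
              (PySem.Int.ofChars? (PySem.Int.toChars sol ++ PySem.Int.toChars arg)).getD 0])
          [])
      sols
    = sols.flatMap (fun s => (pvProduct rest.length).map
        (fun combo => (combo.zip rest).foldl (fun val p => p.1 val p.2) s)) := by
  induction rest generalizing sols with
  | nil => simp [pvProduct]
  | cons r rest ih =>
    simp only [List.foldl_cons]
    rw [show (sols.foldl
        (fun acc sol =>
          acc ++ [sol * r, sol + r,
            (PySem.Int.ofChars? (PySem.Int.toChars sol ++ PySem.Int.toChars r)).getD 0])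
        []) = sols.flatMap (fun s => [s * r, s + r, pvOpConcat s r]) from by
      simpa [pvOpConcat] using PySem.List.foldl_append_eq_flatMap
        (g := fun s => [s * r, s + r, pvOpConcat s r]) (acc := []) (l := sols)]
    rw [ih]
    simp only [List.flatMap_assoc, List.flatMap_cons, List.flatMap_nil,
      List.append_nil]
    congr 1
    funext s
    simp [pvProduct, pvOps, Function.comp_def, List.zip_cons_cons, pvOpMul, pvOpAdd]

theorem get_possible_solutions_2_spec : Claim_equal_get_possible_solutions_2 := by
  intro equation _ _
  unfold Spec_get_possible_solutions_2 get_possible_solutions_2 get_possible_solutions_2_alt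
  rw [pv_levels_eq_product]
  simp
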